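-- pv_equiv track=rewrite | github.com/czl9707/gh-space-shooter | src/gh_space_shooter/output/_svg_tracks.py | _tl_pad_local_track
-- ===== SOURCE A (Python) =====
-- from typing import TypeVar
--
-- _TrackValue = TypeVar("_TrackValue")
--
-- def _tl_pad_local_track(
--     times: list[int], values: list[_TrackValue], duration_ms: int
-- ) -> tuple[list[int], list[_TrackValue]]:
--     if not times or not values or len(times) != len(values):
--         raise ValueError("Local track requires matched time/value samples")
--
--     padded_times = list(times)
--     padded_values = list(values)
--     if padded_times[0] > 0:
--         padded_times.insert(0, 0)
--         padded_values.insert(0, padded_values[0])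
--     if padded_times[-1] < duration_ms:
--         padded_times.append(duration_ms)
--         padded_values.append(padded_values[-1])
--     elif padded_times[-1] > duration_ms:
--         padded_times[-1] = duration_ms
--     merged_times = [padded_times[0]]
--     merged_values = [padded_values[0]]
--     for index in range(1, len(padded_times)):
--         if padded_times[index] == merged_times[-1]:
--             merged_values[-1] = padded_values[index]
--             continue
--         merged_times.append(padded_times[index])
--         merged_values.append(padded_values[index])
--
--     return merged_times, merged_values
-- ===== SOURCE B (Python) =====
-- def _tl_pad_local_track(times, values, duration_ms):
--     if not times or not values or len(times) != len(values):
--         raise ValueError("Local track requires matched time/value samples")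
--
--     head = [(0, values[0])] if times[0] > 0 else []
--     pairs = head + list(zip(times, values))
--     last_t, last_v = pairs[-1]
--     if last_t < duration_ms:
--         pairs = pairs + [(duration_ms, last_v)]
--     elif last_t > duration_ms:
--         pairs = pairs[:-1] + [(duration_ms, last_v)]
--
--     # stage 1: segment into maximal runs of equal consecutive timestamps
--     runs = []
--     i = 0
--     n = len(pairs)
--     while i < n:
--         j = i + 1
--         while j < n and pairs[j][0] == pairs[i][0]:
--             j += 1
--         runs.append(pairs[i:j])
--         i = j
--     # stage 2: each run contributes its last sample (last value wins)
--     merged = [run[-1] for run in runs]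
--     return [t for t, _ in merged], [v for _, v in merged]
-- ===== Notes on version B (the rewrite author's own statement) =====
-- stated objective: alternative
-- what changed: B works on one zipped pair list padded by concatenation and replaces A's single look-back accumulator merge (which overwrites the last result value in place) with two staged passes: first segment the padded list into maximal runs of equal consecutive timestamps, then map each run to its last sample and unzip.
import Mathlib
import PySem

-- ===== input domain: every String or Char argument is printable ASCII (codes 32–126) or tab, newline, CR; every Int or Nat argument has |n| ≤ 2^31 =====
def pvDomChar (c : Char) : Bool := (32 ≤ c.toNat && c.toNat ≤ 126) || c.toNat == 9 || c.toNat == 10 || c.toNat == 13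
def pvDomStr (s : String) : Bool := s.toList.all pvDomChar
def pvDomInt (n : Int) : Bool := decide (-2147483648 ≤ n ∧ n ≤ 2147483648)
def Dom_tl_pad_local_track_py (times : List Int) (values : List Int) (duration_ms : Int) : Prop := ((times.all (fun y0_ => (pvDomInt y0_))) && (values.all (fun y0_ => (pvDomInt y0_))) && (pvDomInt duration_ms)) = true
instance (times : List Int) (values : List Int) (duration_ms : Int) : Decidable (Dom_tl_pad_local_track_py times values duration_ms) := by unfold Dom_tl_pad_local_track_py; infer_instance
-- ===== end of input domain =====

-- B pads one zipped pair list by concatenation and replaces A's look-back accumulator merge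
-- with two staged passes (segment into runs of equal consecutive timestamps, then take the
-- last sample of each run); alternative decomposition, same cost.

-- ===== PORT A =====
def tl_pad_local_track_py (times : List Int) (values : List Int) (duration_ms : Int) : List Int × List Int :=
  let pt1 := if times.headD 0 > 0 then 0 :: times else times
  let pv1 := if times.headD 0 > 0 then values.headD 0 :: values else values
  let pt2 := if pt1.getLastD 0 < duration_ms then pt1 ++ [duration_ms]
             else if pt1.getLastD 0 > duration_ms then pt1.dropLast ++ [duration_ms] else pt1
  let pv2 := if pt1.getLastD 0 < duration_ms then pv1 ++ [pv1.getLastD 0] else pv1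
  ((pt2.zip pv2).drop 1).foldl
    (fun acc p => if p.1 = acc.1.getLastD 0 then (acc.1, acc.2.dropLast ++ [p.2])
                  else (acc.1 ++ [p.1], acc.2 ++ [p.2]))
    ([pt2.headD 0], [pv2.headD 0])

-- ===== PORT B =====
-- Source B's stage 1: the outer while loop segments the list into maximal runs of equal
-- consecutive timestamps; the inner while loop (advance j while the timestamp repeats)
-- is the takeWhile/dropWhile split.
def pvRuns : List (Int × Int) → List (List (Int × Int))
  | [] => []
  | p :: rest =>
      (p :: rest.takeWhile (fun q => q.1 == p.1)) :: pvRuns (rest.dropWhile (fun q => q.1 == p.1))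
termination_by l => l.length
decreasing_by
  exact Nat.lt_succ_of_le (List.length_dropWhile_le _ _)

def tl_pad_local_track_py_alt (times : List Int) (values : List Int) (duration_ms : Int) : List Int × List Int :=
  let head := if times.headD 0 > 0 then [(0, values.headD 0)] else []
  let pairs1 := head ++ times.zip values
  let last := pairs1.getLastD (0, 0)
  let pairs2 := if last.1 < duration_ms then pairs1 ++ [(duration_ms, last.2)]
                else if last.1 > duration_ms then pairs1.dropLast ++ [(duration_ms, last.2)]
                else pairs1
  let merged := (pvRuns pairs2).map (fun run => run.getLastD (0, 0))
  (merged.map Prod.fst, merged.map Prod.snd)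

-- ===== PRECONDITION & SPEC =====
-- Pre_ excludes exactly the inputs on which A raises ValueError: empty times/values or
-- mismatched lengths.
def Pre_tl_pad_local_track_py (times : List Int) (values : List Int) (duration_ms : Int) : Prop :=
  times ≠ [] ∧ values ≠ [] ∧ times.length = values.length
instance (times : List Int) (values : List Int) (duration_ms : Int) : Decidable (Pre_tl_pad_local_track_py times values duration_ms) := by unfold Pre_tl_pad_local_track_py; infer_instance

def pvWitness_tl_pad_local_track_py : List Int × List Int × Int := ([1, 3, 3, 5], [10, 20, 30, 40], 4)

def Spec_tl_pad_local_track_py (times : List Int) (values : List Int) (duration_ms : Int) (out : List Int × List Int) : Prop := out = tl_pad_local_track_py_alt times values duration_ms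
instance (times : List Int) (values : List Int) (duration_ms : Int) (out : List Int × List Int) : Decidable (Spec_tl_pad_local_track_py times values duration_ms out) := by unfold Spec_tl_pad_local_track_py; infer_instance

-- ===== CLAIM (what is proved, stated in full; the proofs are below) =====
def Claim_equal_tl_pad_local_track_py : Prop := ∀ (times : List Int) (values : List Int) (duration_ms : Int), Dom_tl_pad_local_track_py times values duration_ms → Pre_tl_pad_local_track_py times values duration_ms → Spec_tl_pad_local_track_py times values duration_ms (tl_pad_local_track_py times values duration_ms)

-- ===== LEMMAS AND PROOFS =====

-- B's merged list: last sample of each run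
def pvMerged (qs : List (Int × Int)) : List (Int × Int) :=
  (pvRuns qs).map (fun run => run.getLastD (0, 0))

theorem pvRuns_nil : pvRuns [] = [] := by rw [pvRuns.eq_def]

theorem pvMerged_single (p : Int × Int) : pvMerged [p] = [p] := by
  unfold pvMerged; rw [pvRuns.eq_def]; simp [pvRuns_nil]

-- the run decomposition satisfies the look-back recurrence
theorem pvMerged_cons_cons (p q : Int × Int) (rest : List (Int × Int)) :
    pvMerged (p :: q :: rest)
      = if q.1 = p.1 then pvMerged (q :: rest) else p :: pvMerged (q :: rest) := by
  by_cases h : q.1 = p.1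
  · rw [if_pos h]
    unfold pvMerged
    rw [pvRuns.eq_def, pvRuns.eq_def]
    simp only [List.takeWhile_cons, List.dropWhile_cons, h, beq_self_eq_true, if_true]
    have hf : (fun r : Int × Int => r.1 == p.1) = (fun r : Int × Int => r.1 == q.1) := by
      funext r; rw [h]
    rw [hf]
    simp
  · rw [if_neg h]
    unfold pvMerged
    rw [pvRuns.eq_def]
    have hb : (q.1 == p.1) = false := by simpa using h
    simp only [List.takeWhile_cons, List.dropWhile_cons, hb]
    rfl

-- getLastD through a map, with the default mapped as well
theorem pvGetLastD_map {α β : Type} (f : α → β) (l : List α) (d : α) :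
    (l.map f).getLastD (f d) = f (l.getLastD d) := by
  induction l generalizing d with
  | nil => rfl
  | cons a l ih => rw [List.map_cons, List.getLastD_cons, List.getLastD_cons, ih a]

-- A's accumulator loop, started on a nonempty accumulator, is B's runs-then-last merge
theorem pvKeep_loop (rest : List (Int × Int)) :
    ∀ (ts vs : List Int) (t v : Int),
    rest.foldl
      (fun acc p => if p.1 = acc.1.getLastD 0 then (acc.1, acc.2.dropLast ++ [p.2])
                    else (acc.1 ++ [p.1], acc.2 ++ [p.2]))
      (ts ++ [t], vs ++ [v])
    = (ts ++ (pvMerged ((t, v) :: rest)).map Prod.fst,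
       vs ++ (pvMerged ((t, v) :: rest)).map Prod.snd) := by
  induction rest with
  | nil => intro ts vs t v; simp [pvMerged_single]
  | cons p rest ih =>
    obtain ⟨p1, p2⟩ := p
    intro ts vs t v
    simp only [List.foldl_cons, List.getLastD_concat, List.dropLast_concat]
    by_cases h : p1 = t
    · subst h
      rw [pvMerged_cons_cons]
      simpa using ih ts vs p1 p2
    · rw [if_neg h]
      have := ih (ts ++ [t]) (vs ++ [v]) p1 p2
      simp only [List.append_assoc, List.cons_append, List.nil_append] at this ⊢
      rw [this, pvMerged_cons_cons]
      simp [h]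

-- l with its last element re-appended is l
theorem pvDropLast_getLastD {α : Type} : ∀ (l : List α), l ≠ [] → ∀ x : α, l.dropLast ++ [l.getLastD x] = l
  | [a], _, x => by simp
  | a :: b :: m, _, x => by
      have ih := pvDropLast_getLastD (b :: m) (by simp) a
      simpa [List.getLastD_cons] using congrArg (List.cons a) ih

-- A's merge loop over the projections of a nonempty pair list is B's runs-then-last merge
theorem pvMerge_eq (qs : List (Int × Int)) (h : qs ≠ []) :
    (((qs.map Prod.fst).zip (qs.map Prod.snd)).drop 1).foldl
      (fun acc p => if p.1 = acc.1.getLastD 0 then (acc.1, acc.2.dropLast ++ [p.2])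
                    else (acc.1 ++ [p.1], acc.2 ++ [p.2]))
      ([(qs.map Prod.fst).headD 0], [(qs.map Prod.snd).headD 0])
    = ((pvMerged qs).map Prod.fst, (pvMerged qs).map Prod.snd) := by
  cases qs with
  | nil => exact absurd rfl h
  | cons p r =>
    obtain ⟨a, b⟩ := p
    have hz : ((((a,b) :: r).map Prod.fst).zip (((a,b) :: r).map Prod.snd)) = (a,b) :: r :=
      (List.zip_of_prod rfl rfl).symm
    rw [hz]
    simpa using pvKeep_loop r [] [] a b

-- the duration clamp plus merge, phrased on parallel lists, equals B's pair version
theorem pvStage2 (qs : List (Int × Int)) (h : qs ≠ []) (d : Int) :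
    ((((if (qs.map Prod.fst).getLastD 0 < d then qs.map Prod.fst ++ [d]
        else if (qs.map Prod.fst).getLastD 0 > d then (qs.map Prod.fst).dropLast ++ [d]
        else qs.map Prod.fst).zip
       (if (qs.map Prod.fst).getLastD 0 < d then qs.map Prod.snd ++ [(qs.map Prod.snd).getLastD 0]
        else qs.map Prod.snd)).drop 1).foldl
      (fun acc p => if p.1 = acc.1.getLastD 0 then (acc.1, acc.2.dropLast ++ [p.2])
                    else (acc.1 ++ [p.1], acc.2 ++ [p.2]))
      ([(if (qs.map Prod.fst).getLastD 0 < d then qs.map Prod.fst ++ [d]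
         else if (qs.map Prod.fst).getLastD 0 > d then (qs.map Prod.fst).dropLast ++ [d]
         else qs.map Prod.fst).headD 0],
       [(if (qs.map Prod.fst).getLastD 0 < d then qs.map Prod.snd ++ [(qs.map Prod.snd).getLastD 0]
         else qs.map Prod.snd).headD 0]))
    = ((pvMerged (if (qs.getLastD (0,0)).1 < d then qs ++ [(d, (qs.getLastD (0,0)).2)]
          else if (qs.getLastD (0,0)).1 > d then qs.dropLast ++ [(d, (qs.getLastD (0,0)).2)]
          else qs)).map Prod.fst,
       (pvMerged (if (qs.getLastD (0,0)).1 < d then qs ++ [(d, (qs.getLastD (0,0)).2)]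
          else if (qs.getLastD (0,0)).1 > d then qs.dropLast ++ [(d, (qs.getLastD (0,0)).2)]
          else qs)).map Prod.snd) := by
  have e1 : (qs.map Prod.fst).getLastD 0 = (qs.getLastD (0,0)).1 := pvGetLastD_map Prod.fst qs (0,0)
  have e2 : (qs.map Prod.snd).getLastD 0 = (qs.getLastD (0,0)).2 := pvGetLastD_map Prod.snd qs (0,0)
  rw [e1, e2]
  split_ifs with h1 h2
  · have ha : qs.map Prod.fst ++ [d] = (qs ++ [(d, (qs.getLastD (0,0)).2)]).map Prod.fst := by simp
    have hb : qs.map Prod.snd ++ [(qs.getLastD (0,0)).2]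
        = (qs ++ [(d, (qs.getLastD (0,0)).2)]).map Prod.snd := by simp
    rw [ha, hb]
    exact pvMerge_eq _ (by simp)
  · have ha : (qs.map Prod.fst).dropLast ++ [d]
        = (qs.dropLast ++ [(d, (qs.getLastD (0,0)).2)]).map Prod.fst := by
      simp [List.map_dropLast]
    have hb : qs.map Prod.snd = (qs.dropLast ++ [(d, (qs.getLastD (0,0)).2)]).map Prod.snd := by
      have hd := pvDropLast_getLastD (qs.map Prod.snd) (by simpa using h) 0
      rw [e2] at hd
      simp only [List.map_append, List.map_dropLast, List.map_cons, List.map_nil]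
      exact hd.symm
    rw [ha, hb]
    exact pvMerge_eq _ (by simp)
  · exact pvMerge_eq qs h

-- both ports agree when the inputs are the two projections of one nonempty pair list
theorem pvPairs_agree (ps : List (Int × Int)) (hne : ps ≠ []) (d : Int) :
    tl_pad_local_track_py (ps.map Prod.fst) (ps.map Prod.snd) d
      = tl_pad_local_track_py_alt (ps.map Prod.fst) (ps.map Prod.snd) d := by
  cases ps with
  | nil => exact absurd rfl hne
  | cons p ps' =>
    obtain ⟨t, v⟩ := p
    have hz' : ((ps'.map Prod.fst).zip (ps'.map Prod.snd)) = ps' := (List.zip_of_prod rfl rfl).symm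
    unfold tl_pad_local_track_py tl_pad_local_track_py_alt
    simp only [List.map_cons, List.zip_cons_cons, hz', List.headD_cons]
    by_cases h0 : t > 0
    · simpa [pvMerged, hz', h0] using pvStage2 ((0,v) :: (t,v) :: ps') (by simp) d
    · simpa [pvMerged, hz', h0] using pvStage2 ((t,v) :: ps') (by simp) d

-- ===== VERDICT (by name: the statement is the Claim_ definition above) =====
theorem tl_pad_local_track_py_spec : Claim_equal_tl_pad_local_track_py := by
  intro times values d _ hpre
  obtain ⟨ht, hv, hlen⟩ := hpre
  unfold Spec_tl_pad_local_track_py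
  have h1 : (times.zip values).map Prod.fst = times := List.map_fst_zip (le_of_eq hlen)
  have h2 : (times.zip values).map Prod.snd = values := List.map_snd_zip (le_of_eq hlen.symm)
  have hne : times.zip values ≠ [] := by
    cases times with
    | nil => exact absurd rfl ht
    | cons a l => cases values with
      | nil => exact absurd rfl hv
      | cons b m => simp [List.zip]
  have := pvPairs_agree (times.zip values) hne d
  rwa [h1, h2] at this
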